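-- pv_equiv track=rewrite | github.com/981377660LMT/algorithm-study | 5_map/邻接表/Point Distances with Shared Coordinate.py | solve
-- ===== SOURCE A (Python) =====
-- from collections import defaultdict
-- from typing import DefaultDict, List, Tuple
--
-- def solve(points):
--     def update(adjMap: DefaultDict[int, List[Tuple[int, int]]]) -> None:
--         for ps in adjMap.values():
--             sortedPoints = sorted(ps)
--             for i in range(1, len(sortedPoints)):
--                 diff = sortedPoints[i][0] - sortedPoints[i - 1][0]
--                 res[sortedPoints[i][1]] = min(res[sortedPoints[i][1]], diff)
--                 res[sortedPoints[i - 1][1]] = min(res[sortedPoints[i - 1][1]], diff)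
--
--     res = [int(1e20)] * len(points)
--     n = len(points)
--     xToY = defaultdict(list)
--     yToX = defaultdict(list)
--     for i in range(n):
--         xToY[points[i][0]].append((points[i][1], i))
--         yToX[points[i][1]].append((points[i][0], i))
--
--     update(xToY)  # 对横坐标相同的点，比较纵坐标
--     update(yToX)  # 对纵坐标相同的点，比较横坐标
--
--     return res
-- ===== SOURCE B (Python) =====
-- def solve(points):
--     INF = int(1e20)
--     n = len(points)
--     res = []
--     for i, (x, y) in enumerate(points):
--         best = INF
--         for j, (a, b) in enumerate(points):
--             if j == i:
--                 continue
--             if a == x: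
--                 best = min(best, abs(b - y))
--             if b == y:
--                 best = min(best, abs(a - x))
--         res.append(best)
--     return res
-- ===== Notes on version B (the rewrite author's own statement) =====
-- stated objective: simpler
-- what changed: Replaces the defaultdict grouping plus per-group sort and adjacent-pair comparison with a direct double scan that, for each point, takes the minimum |coordinate difference| over every other point sharing an x or y coordinate.
import Mathlib
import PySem

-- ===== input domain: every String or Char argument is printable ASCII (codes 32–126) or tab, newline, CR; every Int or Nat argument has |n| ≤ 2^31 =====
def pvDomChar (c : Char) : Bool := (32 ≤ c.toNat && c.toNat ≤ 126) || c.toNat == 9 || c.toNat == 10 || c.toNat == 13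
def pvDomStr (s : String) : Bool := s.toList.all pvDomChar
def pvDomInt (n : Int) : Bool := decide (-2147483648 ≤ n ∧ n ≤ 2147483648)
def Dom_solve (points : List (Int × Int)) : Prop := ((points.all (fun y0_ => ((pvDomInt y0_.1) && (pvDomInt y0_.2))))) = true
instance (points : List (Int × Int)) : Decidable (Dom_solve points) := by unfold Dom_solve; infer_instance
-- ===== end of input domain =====

-- B replaces A's group-by-coordinate dicts, per-group sort and adjacent-pair minimum updates
-- by a direct double scan taking, for each point, the minimum |coordinate difference| over
-- every other point sharing an x or a y coordinate (objective: simpler, same results).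

-- ===== PORT A =====
-- the nested Python function 'update' (mutates res; ported as a helper returning the new res)
def pvUpdate (res : List Int) (adjValues : List (List (Int × Int))) : List Int :=
  adjValues.foldl (fun res ps =>
    let sortedPoints := PySem.List.sorted2 ps (fun p => p.1) (fun p => p.2)
    (PySem.List.pyRange 1 (PySem.List.len sortedPoints) 1).foldl (fun res i =>
      let cur := PySem.List.pyGetD sortedPoints i (0, 0)
      let prev := PySem.List.pyGetD sortedPoints (i - 1) (0, 0)
      let diff := cur.1 - prev.1
      let res := PySem.List.pySetD res cur.2 (min (PySem.List.pyGetD res cur.2 0) diff)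
      PySem.List.pySetD res prev.2 (min (PySem.List.pyGetD res prev.2 0) diff)) res) res

def solve (points : List (Int × Int)) : List Int :=
  let res := List.replicate points.length (100000000000000000000 : Int)
  let n : Int := PySem.List.len points
  -- the Python loop fills xToY and yToX together; ported as one fold with a pair state
  let dicts := (PySem.List.pyRange 0 n 1).foldl
    (fun (d : PySem.Dict Int (List (Int × Int)) × PySem.Dict Int (List (Int × Int))) i =>
      let p := PySem.List.pyGetD points i (0, 0)
      (d.1.modify p.1 [] (fun l => l ++ [(p.2, i)]),
       d.2.modify p.2 [] (fun l => l ++ [(p.1, i)])))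
    (PySem.Dict.empty, PySem.Dict.empty)
  let res := pvUpdate res dicts.1.values
  let res := pvUpdate res dicts.2.values
  res

-- ===== PORT B =====
def solve_alt (points : List (Int × Int)) : List Int :=
  (PySem.List.enumerate points).foldl (fun res p =>
    let best := (PySem.List.enumerate points).foldl (fun best q =>
      if q.1 = p.1 then best
      else
        let best := if q.2.1 = p.2.1 then min best |q.2.2 - p.2.2| else best
        if q.2.2 = p.2.2 then min best |q.2.1 - p.2.1| else best)
      (100000000000000000000 : Int)
    res ++ [best]) []

-- ===== PRECONDITION & SPEC =====
def Spec_solve (points : List (Int × Int)) (out : List Int) : Prop := out = solve_alt points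
instance (points : List (Int × Int)) (out : List Int) : Decidable (Spec_solve points out) := by unfold Spec_solve; infer_instance

-- ===== CLAIM (what is proved, stated in full; the proofs are below) =====
def Claim_equal_solve : Prop := ∀ (points : List (Int × Int)), Dom_solve points → Spec_solve points (solve points)

-- ===== LEMMAS AND PROOFS =====

-- proof-side abbreviations
def pvKey (p : Int × Int) : Lex (Int × Int) := toLex p
def pvSorted (g : List (Int × Int)) : List (Int × Int) := PySem.List.sorted g pvKey
def pvGX (points : List (Int × Int)) (c : Int) : List (Int × Int) :=
  ((PySem.List.enumerate points).filter (fun p => p.2.1 == c)).map (fun p => (p.2.2, p.1))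
def pvGY (points : List (Int × Int)) (c : Int) : List (Int × Int) :=
  ((PySem.List.enumerate points).filter (fun p => p.2.2 == c)).map (fun p => (p.2.1, p.1))
-- the multiset of (index, value) min-updates a sorted group generates
def pvU (s : List (Int × Int)) : List (Int × Int) :=
  (s.zip s.tail).flatMap (fun pq => [(pq.2.2, pq.2.1 - pq.1.1), (pq.1.2, pq.2.1 - pq.1.1)])
def pvApply (res : List Int) (us : List (Int × Int)) : List Int :=
  us.foldl (fun r u => PySem.List.pySetD r u.1 (min (PySem.List.pyGetD r u.1 0) u.2)) res
def pvUX (points : List (Int × Int)) : List (Int × Int) :=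
  (PySem.Set.ofList (points.map (fun p => p.1))).flatMap (fun c => pvU (pvSorted (pvGX points c)))
def pvUY (points : List (Int × Int)) : List (Int × Int) :=
  (PySem.Set.ofList (points.map (fun p => p.2))).flatMap (fun c => pvU (pvSorted (pvGY points c)))
def pvVals (us : List (Int × Int)) (i : Int) : List Int :=
  (us.filter (fun u => u.1 == i)).map (fun u => u.2)
def pvFB (i x y : Int) (q : Int × (Int × Int)) : List Int :=
  if q.1 = i then [] else
    (if q.2.1 = x then [|q.2.2 - y|] else []) ++ (if q.2.2 = y then [|q.2.1 - x|] else [])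
def pvAllB (points : List (Int × Int)) (i x y : Int) : List Int :=
  (PySem.List.enumerate points).flatMap (pvFB i x y)

-- Python sorted(ps) on pairs is the lexicographic-key sort
theorem pv_sorted2_eq (g : List (Int × Int)) :
    PySem.List.sorted2 g (fun p => p.1) (fun p => p.2) = pvSorted g := by
  have hbe : (fun a b : Int × Int => decide (a.1 < b.1) || (!decide (b.1 < a.1) && decide (a.2 < b.2)))
      = fun a b : Int × Int => decide (pvKey a < pvKey b) := by
    funext a b
    by_cases h1 : a.1 < b.1 <;> by_cases h2 : b.1 < a.1 <;> by_cases h3 : a.2 < b.2 <;>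
      simp [pvKey, Prod.Lex.toLex_lt_toLex, h1, h2, h3] <;> omega
  simp only [PySem.List.sorted2, pvSorted, PySem.List.sorted]
  simp only [hbe]
  simp

-- the inner range loop of 'update' is the adjacent-pairs fold
theorem pv_range_pairs (s : List (Int × Int)) :
    (PySem.List.pyRange 1 (PySem.List.len s) 1).map
        (fun i => (PySem.List.pyGetD s (i - 1) (0, 0), PySem.List.pyGetD s i (0, 0)))
      = s.zip s.tail := by
  apply List.ext_getElem
  · simp only [List.length_map, PySem.List.length_pyRange_one, PySem.List.len_eq,
      List.length_zip, List.length_tail]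
    omega
  intro k h1 h2
  have hk1 : k + 1 < s.length := by
    simp only [List.length_zip, List.length_tail] at h2; omega
  simp only [List.getElem_map, List.getElem_zip, List.getElem_tail,
    PySem.List.getElem_pyRange_one]
  have e1 : (1 : Int) + (k : Int) - 1 = ((k : Nat) : Int) := by ring
  have e2 : (1 : Int) + (k : Int) = (((k + 1 : Nat)) : Int) := by push_cast; ring
  rw [e1, e2, PySem.List.pyGetD_natCast, PySem.List.pyGetD_natCast,
    List.getD_eq_getElem s _ (by omega), List.getD_eq_getElem s _ hk1]

theorem pv_update_eq (res : List Int) (groups : List (List (Int × Int))) :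
    pvUpdate res groups = groups.foldl (fun r g => pvApply r (pvU (pvSorted g))) res := by
  unfold pvUpdate
  congr 1
  funext r g
  rw [pv_sorted2_eq]
  trans (((pvSorted g).zip (pvSorted g).tail).foldl
      (fun res pq => PySem.List.pySetD
        (PySem.List.pySetD res pq.2.2 (min (PySem.List.pyGetD res pq.2.2 0) (pq.2.1 - pq.1.1)))
        pq.1.2
        (min (PySem.List.pyGetD
          (PySem.List.pySetD res pq.2.2 (min (PySem.List.pyGetD res pq.2.2 0) (pq.2.1 - pq.1.1)))
          pq.1.2 0) (pq.2.1 - pq.1.1))) r)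
  · rw [← pv_range_pairs (pvSorted g), List.foldl_map]
  · rw [pvApply, pvU, List.foldl_flatMap]
    apply PySem.List.foldl_congr_mem
    intro acc pq _
    rfl

theorem pv_apply_append (res : List Int) (us vs : List (Int × Int)) :
    pvApply res (us ++ vs) = pvApply (pvApply res us) vs := by
  simp [pvApply, List.foldl_append]

theorem pv_length_apply (res : List Int) (us : List (Int × Int)) :
    (pvApply res us).length = res.length := by
  induction us generalizing res with
  | nil => rfl
  | cons u us ih =>
    simp only [pvApply, List.foldl_cons] at *
    rw [ih, PySem.List.length_pySetD]

theorem pv_apply_get (us : List (Int × Int)) (res : List Int) (t : Nat)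
    (ht : t < res.length) (hus : ∀ u ∈ us, 0 ≤ u.1) :
    PySem.List.pyGetD (pvApply res us) (t : Int) 0
      = (pvVals us t).foldl min (PySem.List.pyGetD res (t : Int) 0) := by
  induction us generalizing res with
  | nil => rfl
  | cons u us ih =>
    have hul : ∀ w ∈ us, 0 ≤ w.1 := fun w hw => hus w (List.mem_cons_of_mem _ hw)
    have hu0 : 0 ≤ u.1 := hus u List.mem_cons_self
    have hcast : ((u.1.toNat : Nat) : Int) = u.1 := Int.toNat_of_nonneg hu0
    simp only [pvApply, List.foldl_cons] at *
    by_cases hin : u.1.toNat < res.length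
    · have hlen' : (PySem.List.pySetD res u.1 (min (PySem.List.pyGetD res u.1 0) u.2)).length
          = res.length := PySem.List.length_pySetD res u.1 _
      rw [ih _ (by omega) hul]
      have hget : PySem.List.pyGetD
          (PySem.List.pySetD res u.1 (min (PySem.List.pyGetD res u.1 0) u.2)) (t : Int) 0
          = if t = u.1.toNat then min (PySem.List.pyGetD res u.1 0) u.2
            else PySem.List.pyGetD res (t : Int) 0 := by
        have hget0 := PySem.List.pyGetD_pySetD_natCast res u.1.toNat t
          (min (PySem.List.pyGetD res u.1 0) u.2) 0 hin
        rw [hcast] at hget0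
        exact hget0
      by_cases he : u.1 = (t : Int)
      · have ht' : t = u.1.toNat := by omega
        rw [hget, if_pos ht']
        have hv : pvVals (u :: us) (t : Int) = u.2 :: pvVals us (t : Int) := by
          simp [pvVals, he]
        rw [hv, List.foldl_cons, he]
      · have ht' : ¬ t = u.1.toNat := by omega
        rw [hget, if_neg ht']
        have hv : pvVals (u :: us) (t : Int) = pvVals us (t : Int) := by
          simp [pvVals, he]
        rw [hv]
    · have hnone : PySem.List.pySet? res u.1 (min (PySem.List.pyGetD res u.1 0) u.2) = none := by
        rw [PySem.List.pySet?_eq_none_iff]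
        intro hr
        rcases hr with ⟨_, hr2⟩
        omega
      have hid : PySem.List.pySetD res u.1 (min (PySem.List.pyGetD res u.1 0) u.2) = res := by
        simp [PySem.List.pySetD, hnone]
      rw [hid, ih _ ht hul]
      have he : ¬ u.1 = (t : Int) := by omega
      have hv : pvVals (u :: us) (t : Int) = pvVals us (t : Int) := by
        simp [pvVals, he]
      rw [hv]

-- dict characterization
theorem pv_dicts (points : List (Int × Int)) :
    (PySem.List.pyRange 0 (PySem.List.len points) 1).foldl
      (fun (d : PySem.Dict Int (List (Int × Int)) × PySem.Dict Int (List (Int × Int))) i =>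
        let p := PySem.List.pyGetD points i (0, 0)
        (d.1.modify p.1 [] (fun l => l ++ [(p.2, i)]),
         d.2.modify p.2 [] (fun l => l ++ [(p.1, i)])))
      (PySem.Dict.empty, PySem.Dict.empty)
    = ((PySem.List.enumerate points).foldl
        (fun d q => d.modify q.2.1 [] (fun l => l ++ [(q.2.2, q.1)])) PySem.Dict.empty,
       (PySem.List.enumerate points).foldl
        (fun d q => d.modify q.2.2 [] (fun l => l ++ [(q.2.1, q.1)])) PySem.Dict.empty) := by
  rw [PySem.List.foldl_prod_mk
    (f := fun d i => PySem.Dict.modify d (PySem.List.pyGetD points i (0, 0)).1 []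
      (fun l => l ++ [((PySem.List.pyGetD points i (0, 0)).2, i)]))
    (g := fun d i => PySem.Dict.modify d (PySem.List.pyGetD points i (0, 0)).2 []
      (fun l => l ++ [((PySem.List.pyGetD points i (0, 0)).1, i)]))]
  rw [PySem.List.enumerate_eq_map_pyRange points (0, 0), List.foldl_map, List.foldl_map]

theorem pv_valuesX (points : List (Int × Int)) :
    ((PySem.List.enumerate points).foldl
        (fun d q => d.modify q.2.1 [] (fun l => l ++ [(q.2.2, q.1)])) PySem.Dict.empty).values
      = (PySem.Set.ofList (points.map (fun p => p.1))).map (fun c => pvGX points c) := by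
  have hnd : ((PySem.List.enumerate points).foldl
      (fun d q => d.modify q.2.1 [] (fun l => l ++ [(q.2.2, q.1)])) PySem.Dict.empty).keys.Nodup :=
    PySem.Dict.nodup_keys_foldl_modify_key (PySem.List.enumerate points) (fun q => q.2.1) []
      (fun _ q => fun l => l ++ [(q.2.2, q.1)]) PySem.Dict.empty (by simp)
  have hk : ((PySem.List.enumerate points).foldl
      (fun d q => d.modify q.2.1 [] (fun l => l ++ [(q.2.2, q.1)])) PySem.Dict.empty).keys
      = PySem.Set.ofList (points.map (fun p => p.1)) := by
    rw [PySem.Dict.keys_foldl_modify_key (PySem.List.enumerate points) (fun q => q.2.1) []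
      (fun _ q => fun l => l ++ [(q.2.2, q.1)]) PySem.Dict.empty]
    have hmap : (PySem.List.enumerate points).map (fun q => q.2.1)
        = points.map (fun p => p.1) := by
      rw [show (fun q : Int × (Int × Int) => q.2.1)
          = (fun p : Int × Int => p.1) ∘ (fun q : Int × (Int × Int) => q.2) from rfl,
        ← List.map_map, PySem.List.map_snd_enumerate]
    rw [hmap, PySem.Set.ofList_eq_foldl]
    rfl
  rw [PySem.Dict.values_eq_map_keys _ hnd [], hk]
  apply List.map_congr_left
  intro c _
  have hfold : (PySem.List.enumerate points).foldl
      (fun d q => d.modify q.2.1 [] (fun l => l ++ [(q.2.2, q.1)])) PySem.Dict.empty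
      = ((PySem.List.enumerate points).map (fun q => (q.2.1, (q.2.2, q.1)))).foldl
        (fun d p => d.modify p.1 [] (fun x => x ++ [p.2])) PySem.Dict.empty := by
    rw [List.foldl_map]
  rw [hfold, PySem.Dict.getD_foldl_modify_append]
  simp [List.filter_map, pvGX, List.map_map, Function.comp_def]

theorem pv_valuesY (points : List (Int × Int)) :
    ((PySem.List.enumerate points).foldl
        (fun d q => d.modify q.2.2 [] (fun l => l ++ [(q.2.1, q.1)])) PySem.Dict.empty).values
      = (PySem.Set.ofList (points.map (fun p => p.2))).map (fun c => pvGY points c) := by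
  have hnd : ((PySem.List.enumerate points).foldl
      (fun d q => d.modify q.2.2 [] (fun l => l ++ [(q.2.1, q.1)])) PySem.Dict.empty).keys.Nodup :=
    PySem.Dict.nodup_keys_foldl_modify_key (PySem.List.enumerate points) (fun q => q.2.2) []
      (fun _ q => fun l => l ++ [(q.2.1, q.1)]) PySem.Dict.empty (by simp)
  have hk : ((PySem.List.enumerate points).foldl
      (fun d q => d.modify q.2.2 [] (fun l => l ++ [(q.2.1, q.1)])) PySem.Dict.empty).keys
      = PySem.Set.ofList (points.map (fun p => p.2)) := by
    rw [PySem.Dict.keys_foldl_modify_key (PySem.List.enumerate points) (fun q => q.2.2) []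
      (fun _ q => fun l => l ++ [(q.2.1, q.1)]) PySem.Dict.empty]
    have hmap : (PySem.List.enumerate points).map (fun q => q.2.2)
        = points.map (fun p => p.2) := by
      rw [show (fun q : Int × (Int × Int) => q.2.2)
          = (fun p : Int × Int => p.2) ∘ (fun q : Int × (Int × Int) => q.2) from rfl,
        ← List.map_map, PySem.List.map_snd_enumerate]
    rw [hmap, PySem.Set.ofList_eq_foldl]
    rfl
  rw [PySem.Dict.values_eq_map_keys _ hnd [], hk]
  apply List.map_congr_left
  intro c _
  have hfold : (PySem.List.enumerate points).foldl
      (fun d q => d.modify q.2.2 [] (fun l => l ++ [(q.2.1, q.1)])) PySem.Dict.empty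
      = ((PySem.List.enumerate points).map (fun q => (q.2.2, (q.2.1, q.1)))).foldl
        (fun d p => d.modify p.1 [] (fun x => x ++ [p.2])) PySem.Dict.empty := by
    rw [List.foldl_map]
  rw [hfold, PySem.Dict.getD_foldl_modify_append]
  simp [List.filter_map, pvGY, List.map_map, Function.comp_def]

theorem pv_update_flat (r : List Int) (ks : List Int) (G : Int → List (Int × Int)) :
    pvUpdate r (ks.map G) = pvApply r (ks.flatMap (fun c => pvU (pvSorted (G c)))) := by
  rw [pv_update_eq, List.foldl_map]
  rw [pvApply, List.foldl_flatMap]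
  rfl

theorem pv_solve_eq (points : List (Int × Int)) :
    solve points = pvApply (List.replicate points.length (100000000000000000000 : Int))
      (pvUX points ++ pvUY points) := by
  simp only [solve]
  rw [pv_dicts]
  rw [pv_apply_append]
  show pvUpdate (pvUpdate _ _) _ = _
  rw [pv_valuesX, pv_valuesY, pv_update_flat, pv_update_flat]
  rfl

-- membership in the update multiset
theorem pv_mem_U (s : List (Int × Int)) (u : Int × Int) :
    u ∈ pvU s ↔ ∃ k, ∃ h : k + 1 < s.length,
      u = (s[k + 1].2, s[k + 1].1 - s[k].1) ∨ u = (s[k].2, s[k + 1].1 - s[k].1) := by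
  simp only [pvU, List.mem_flatMap, List.mem_cons, List.not_mem_nil, or_false]
  constructor
  · rintro ⟨pq, hpq, hu⟩
    obtain ⟨k, hk, hget⟩ := List.mem_iff_getElem.mp hpq
    have hk1 : k + 1 < s.length := by
      simp only [List.length_zip, List.length_tail] at hk; omega
    have : pq = (s[k], s[k + 1]) := by
      rw [← hget]; simp [List.getElem_zip, List.getElem_tail]
    subst this
    exact ⟨k, hk1, hu⟩
  · rintro ⟨k, hk, hu⟩
    refine ⟨(s[k], s[k + 1]), ?_, hu⟩
    apply List.mem_iff_getElem.mpr
    refine ⟨k, ?_, ?_⟩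
    · simp only [List.length_zip, List.length_tail]; omega
    · simp [List.getElem_zip, List.getElem_tail]

-- sorted-group facts
theorem pv_sorted_mono (g : List (Int × Int)) :
    (pvSorted g).Pairwise (fun a b => a.1 ≤ b.1) := by
  refine (PySem.List.sorted_pairwise g pvKey).imp ?_
  intro a b hab
  rcases Prod.Lex.toLex_le_toLex.mp hab with h | ⟨h1, _⟩
  · exact le_of_lt h
  · exact le_of_eq h1

theorem pv_gX_nodup (points : List (Int × Int)) (c : Int) :
    ((pvGX points c).map (fun p => p.2)).Nodup := by
  have h2 := (PySem.List.pairwise_lt_enumerate points 0).filter (fun p => p.2.1 == c)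
  simp only [pvGX, List.map_map, List.Nodup, List.pairwise_map]
  exact h2.imp (fun hlt => ne_of_lt hlt)

theorem pv_gY_nodup (points : List (Int × Int)) (c : Int) :
    ((pvGY points c).map (fun p => p.2)).Nodup := by
  have h2 := (PySem.List.pairwise_lt_enumerate points 0).filter (fun p => p.2.2 == c)
  simp only [pvGY, List.map_map, List.Nodup, List.pairwise_map]
  exact h2.imp (fun hlt => ne_of_lt hlt)

theorem pv_mem_gX (points : List (Int × Int)) (c : Int) (p : Int × Int) :
    p ∈ pvGX points c ↔ ∃ k, ∃ h : k < points.length,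
      points[k].1 = c ∧ p = (points[k].2, (k : Int)) := by
  simp only [pvGX, List.mem_map, List.mem_filter, PySem.List.mem_enumerate_iff]
  constructor
  · rintro ⟨q, ⟨⟨k, hk, rfl⟩, hq⟩, rfl⟩
    rw [beq_iff_eq] at hq
    exact ⟨k, hk, hq, by simp⟩
  · rintro ⟨k, hk, hc, rfl⟩
    exact ⟨((k : Int), points[k]), ⟨⟨k, hk, by simp⟩, by simp [hc]⟩, rfl⟩

theorem pv_mem_gY (points : List (Int × Int)) (c : Int) (p : Int × Int) :
    p ∈ pvGY points c ↔ ∃ k, ∃ h : k < points.length,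
      points[k].2 = c ∧ p = (points[k].1, (k : Int)) := by
  simp only [pvGY, List.mem_map, List.mem_filter, PySem.List.mem_enumerate_iff]
  constructor
  · rintro ⟨q, ⟨⟨k, hk, rfl⟩, hq⟩, rfl⟩
    rw [beq_iff_eq] at hq
    exact ⟨k, hk, hq, by simp⟩
  · rintro ⟨k, hk, hc, rfl⟩
    exact ⟨((k : Int), points[k]), ⟨⟨k, hk, by simp⟩, by simp [hc]⟩, rfl⟩

theorem pv_U_fst_mem (s : List (Int × Int)) (u : Int × Int) (h : u ∈ pvU s) :
    ∃ p ∈ s, u.1 = p.2 := by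
  rw [pv_mem_U] at h
  obtain ⟨k, hk, hc | hc⟩ := h
  · exact ⟨s[k + 1], List.getElem_mem hk, by rw [hc]⟩
  · exact ⟨s[k], List.getElem_mem (by omega), by rw [hc]⟩

theorem pv_U_fst_nonneg (points : List (Int × Int)) (u : Int × Int)
    (h : u ∈ pvUX points ++ pvUY points) : 0 ≤ u.1 := by
  rcases List.mem_append.mp h with h | h
  · obtain ⟨c, _, hu⟩ := List.mem_flatMap.mp h
    obtain ⟨p, hp, he⟩ := pv_U_fst_mem _ _ hu
    rw [pvSorted, PySem.List.mem_sorted] at hp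
    obtain ⟨k, _, _, rfl⟩ := (pv_mem_gX points c p).mp hp
    rw [he]; positivity
  · obtain ⟨c, _, hu⟩ := List.mem_flatMap.mp h
    obtain ⟨p, hp, he⟩ := pv_U_fst_mem _ _ hu
    rw [pvSorted, PySem.List.mem_sorted] at hp
    obtain ⟨k, _, _, rfl⟩ := (pv_mem_gY points c p).mp hp
    rw [he]; positivity

-- the element of s carrying index i is unique
theorem pv_pos_unique (s : List (Int × Int)) (hnd : (s.map (fun p => p.2)).Nodup)
    (v i : Int) (hvi : (v, i) ∈ s) (k : Nat) (hk : k < s.length) (h2 : s[k].2 = i) :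
    s[k] = (v, i) := by
  obtain ⟨r, hr, hsr⟩ := List.mem_iff_getElem.mp hvi
  have hmk : k < (s.map (fun p => p.2)).length := by simpa using hk
  have hmr : r < (s.map (fun p => p.2)).length := by simpa using hr
  have heq : (s.map (fun p => p.2))[k]'hmk = (s.map (fun p => p.2))[r]'hmr := by
    simp [List.getElem_map, h2, hsr]
  have hkr : k = r := (List.Nodup.getElem_inj_iff hnd).mp heq
  subst hkr; exact hsr

-- soundness: every update value at index i is a same-group distance from (v,i)
theorem pv_snd_ne (s : List (Int × Int)) (hnd : (s.map (fun p => p.2)).Nodup)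
    (k j : Nat) (hk : k < s.length) (hj : j < s.length) (hne : k ≠ j) :
    s[k].2 ≠ s[j].2 := by
  intro hcon
  have hmk : k < (s.map (fun p => p.2)).length := by simpa using hk
  have hmj : j < (s.map (fun p => p.2)).length := by simpa using hj
  have heq : (s.map (fun p => p.2))[k]'hmk = (s.map (fun p => p.2))[j]'hmj := by
    simp [List.getElem_map, hcon]
  exact hne ((List.Nodup.getElem_inj_iff hnd).mp heq)

theorem pv_GA (s : List (Int × Int)) (hm : s.Pairwise (fun a b => a.1 ≤ b.1))
    (hnd : (s.map (fun p => p.2)).Nodup) (v i : Int) (hvi : (v, i) ∈ s) :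
    ∀ a ∈ pvVals (pvU s) i, ∃ p ∈ s, p.2 ≠ i ∧ a = |v - p.1| := by
  intro a ha
  simp only [pvVals, List.mem_map, List.mem_filter] at ha
  obtain ⟨u, ⟨huU, hui⟩, rfl⟩ := ha
  rw [beq_iff_eq] at hui
  rw [pv_mem_U] at huU
  have hmono := List.pairwise_iff_getElem.mp hm
  obtain ⟨k, hk, hc | hc⟩ := huU
  · have hi2 : s[k + 1].2 = i := by rw [hc] at hui; exact hui
    have heq : s[k + 1] = (v, i) := pv_pos_unique s hnd v i hvi (k + 1) hk hi2
    refine ⟨s[k], List.getElem_mem (by omega), ?_, ?_⟩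
    · intro hcon
      exact pv_snd_ne s hnd k (k + 1) (by omega) hk (by omega) (by rw [hcon, hi2])
    · have hle : s[k].1 ≤ s[k + 1].1 := hmono k (k + 1) (by omega) hk (by omega)
      have hv1 : s[k + 1].1 = v := by rw [heq]
      have hle' : s[k].1 ≤ v := hv1 ▸ hle
      rw [hc]
      show s[k + 1].1 - s[k].1 = |v - s[k].1|
      rw [hv1, abs_of_nonneg (by omega)]
  · have hi2 : s[k].2 = i := by rw [hc] at hui; exact hui
    have heq : s[k] = (v, i) := pv_pos_unique s hnd v i hvi k (by omega) hi2
    refine ⟨s[k + 1], List.getElem_mem hk, ?_, ?_⟩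
    · intro hcon
      exact pv_snd_ne s hnd (k + 1) k hk (by omega) (by omega) (by rw [hcon, hi2])
    · have hle : s[k].1 ≤ s[k + 1].1 := hmono k (k + 1) (by omega) hk (by omega)
      have hv1 : s[k].1 = v := by rw [heq]
      have hle' : v ≤ s[k + 1].1 := hv1 ▸ hle
      rw [hc]
      show s[k + 1].1 - s[k].1 = |v - s[k + 1].1|
      rw [hv1, abs_sub_comm, abs_of_nonneg (by omega)]

-- completeness: every same-group distance dominates some update value at index i
theorem pv_GB (s : List (Int × Int)) (hm : s.Pairwise (fun a b => a.1 ≤ b.1))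
    (_hnd : (s.map (fun p => p.2)).Nodup) (v i : Int) (hvi : (v, i) ∈ s) :
    ∀ p ∈ s, p.2 ≠ i → ∃ a ∈ pvVals (pvU s) i, a ≤ |v - p.1| := by
  intro p hp hpne
  obtain ⟨m, hmlen, hsm⟩ := List.mem_iff_getElem.mp hp
  obtain ⟨k, hklen, hsk⟩ := List.mem_iff_getElem.mp hvi
  have hki : s[k].2 = i := by rw [hsk]
  have hkv : s[k].1 = v := by rw [hsk]
  have hpm2 : s[m].2 = p.2 := by rw [hsm]
  have hpm1 : s[m].1 = p.1 := by rw [hsm]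
  have hmk : m ≠ k := by
    intro h
    subst h
    exact hpne (by rw [← hpm2, hki])
  have hmono := List.pairwise_iff_getElem.mp hm
  rcases Nat.lt_or_ge m k with hlt | hge
  · have hk1 : k - 1 + 1 < s.length := by omega
    refine ⟨s[k].1 - s[k - 1].1, ?_, ?_⟩
    · simp only [pvVals, List.mem_map, List.mem_filter]
      refine ⟨(s[k].2, s[k].1 - s[k - 1].1), ⟨?_, by rw [beq_iff_eq]; exact hki⟩, rfl⟩
      rw [pv_mem_U]
      refine ⟨k - 1, hk1, Or.inl ?_⟩
      simp only [show k - 1 + 1 = k from by omega]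
    · have h1 : s[m].1 ≤ s[k - 1].1 := by
        rcases Nat.lt_or_ge m (k - 1) with h | h
        · exact hmono m (k - 1) hmlen (by omega) h
        · have : m = k - 1 := by omega
          subst this
          exact le_refl _
      have h2 : s[m].1 ≤ s[k].1 := hmono m k hmlen hklen hlt
      rw [abs_of_nonneg (by omega)]
      omega
  · have hklt : k < m := by omega
    have hk1 : k + 1 < s.length := by omega
    refine ⟨s[k + 1].1 - s[k].1, ?_, ?_⟩
    · simp only [pvVals, List.mem_map, List.mem_filter]
      refine ⟨(s[k].2, s[k + 1].1 - s[k].1), ⟨?_, by rw [beq_iff_eq]; exact hki⟩, rfl⟩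
      rw [pv_mem_U]
      exact ⟨k, hk1, Or.inr rfl⟩
    · have h1 : s[k + 1].1 ≤ s[m].1 := by
        rcases Nat.lt_or_ge (k + 1) m with h | h
        · exact hmono (k + 1) m hk1 hmlen h
        · have : m = k + 1 := by omega
          subst this
          exact le_refl _
      have h2 : s[k].1 ≤ s[m].1 := hmono k m hklen hmlen hklt
      rw [abs_sub_comm, abs_of_nonneg (by omega)]
      omega

-- min-fold equality from mutual domination
theorem pv_mfold_eq (A : Int) (l1 l2 : List Int)
    (h1 : ∀ a ∈ l1, ∃ b ∈ l2, b ≤ a) (h2 : ∀ b ∈ l2, ∃ a ∈ l1, a ≤ b) :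
    l1.foldl min A = l2.foldl min A := by
  apply le_antisymm
  · rcases PySem.List.foldl_min_mem l2 A with h | h
    · rw [h]; exact (PySem.List.foldl_min_le l1 A).1
    · obtain ⟨a, ha, hle⟩ := h2 _ h
      exact le_trans ((PySem.List.foldl_min_le l1 A).2 a ha) hle
  · rcases PySem.List.foldl_min_mem l1 A with h | h
    · rw [h]; exact (PySem.List.foldl_min_le l2 A).1
    · obtain ⟨b, hb, hle⟩ := h1 _ h
      exact le_trans ((PySem.List.foldl_min_le l2 A).2 b hb) hle

theorem pv_vals_append (us vs : List (Int × Int)) (i : Int) :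
    pvVals (us ++ vs) i = pvVals us i ++ pvVals vs i := by
  simp [pvVals, List.filter_append]

theorem pv_vals_flatMap {β : Type} (l : List β) (h : β → List (Int × Int)) (i : Int) :
    pvVals (l.flatMap h) i = l.flatMap (fun c => pvVals (h c) i) := by
  induction l with
  | nil => rfl
  | cons c l ih =>
    simp only [List.flatMap_cons, pvVals, List.filter_append, List.map_append] at *
    rw [ih]

-- the two domination lemmas at a fixed point index t
theorem pv_sorted_nodup (g : List (Int × Int)) (h : (g.map (fun p => p.2)).Nodup) :
    ((pvSorted g).map (fun p => p.2)).Nodup :=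
  ((PySem.List.sorted_perm g pvKey false).map (fun p => p.2)).nodup_iff.mpr h

theorem pv_dom1 (points : List (Int × Int)) (t : Nat) (ht : t < points.length) :
    ∀ a ∈ pvVals (pvUX points ++ pvUY points) (t : Int),
      ∃ b ∈ pvAllB points (t : Int) points[t].1 points[t].2, b ≤ a := by
  intro a ha
  rw [pv_vals_append] at ha
  rcases List.mem_append.mp ha with hX | hX
  · rw [pvUX, pv_vals_flatMap] at hX
    obtain ⟨c, _, hac⟩ := List.mem_flatMap.mp hX
    have hnds : ((pvSorted (pvGX points c)).map (fun p => p.2)).Nodup :=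
      pv_sorted_nodup _ (pv_gX_nodup points c)
    have hex : ∃ e ∈ pvSorted (pvGX points c), e.2 = (t : Int) := by
      simp only [pvVals, List.mem_map, List.mem_filter] at hac
      obtain ⟨u, ⟨huU, hui⟩, _⟩ := hac
      rw [beq_iff_eq] at hui
      obtain ⟨e, he, hue⟩ := pv_U_fst_mem _ _ huU
      exact ⟨e, he, by rw [← hue, hui]⟩
    obtain ⟨e, he, het⟩ := hex
    have heg : e ∈ pvGX points c := by rw [pvSorted, PySem.List.mem_sorted] at he; exact he
    obtain ⟨k, hkl, hkc, hke⟩ := (pv_mem_gX points c e).mp heg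
    have hkt : k = t := by
      have h2 : ((k : Nat) : Int) = (t : Int) := by rw [hke] at het; exact het
      exact_mod_cast h2
    subst hkt
    have hvi : ((points[k].2 : Int), ((k : Nat) : Int)) ∈ pvSorted (pvGX points c) :=
      hke ▸ he
    obtain ⟨p, hps, hpne, hav⟩ :=
      pv_GA _ (pv_sorted_mono _) hnds points[k].2 ((k : Nat) : Int) hvi a hac
    have hpg : p ∈ pvGX points c := by rw [pvSorted, PySem.List.mem_sorted] at hps; exact hps
    obtain ⟨j, hjl, hjc, hjp⟩ := (pv_mem_gX points c p).mp hpg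
    refine ⟨|points[j].2 - points[k].2|, ?_, ?_⟩
    · rw [pvAllB]
      apply List.mem_flatMap.mpr
      refine ⟨((j : Int), points[j]),
        (PySem.List.mem_enumerate_iff points 0 _).mpr ⟨j, hjl, by simp⟩, ?_⟩
      simp only [pvFB]
      rw [if_neg (by intro hcon; apply hpne; rw [hjp]; exact hcon)]
      apply List.mem_append_left
      rw [if_pos (by rw [hjc, hkc])]
      simp
    · rw [hav, hjp]
      rw [show ((points[j].2 : Int), ((j : Nat) : Int)).1 = points[j].2 from rfl]
      rw [abs_sub_comm]
  · rw [pvUY, pv_vals_flatMap] at hX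
    obtain ⟨c, _, hac⟩ := List.mem_flatMap.mp hX
    have hnds : ((pvSorted (pvGY points c)).map (fun p => p.2)).Nodup :=
      pv_sorted_nodup _ (pv_gY_nodup points c)
    have hex : ∃ e ∈ pvSorted (pvGY points c), e.2 = (t : Int) := by
      simp only [pvVals, List.mem_map, List.mem_filter] at hac
      obtain ⟨u, ⟨huU, hui⟩, _⟩ := hac
      rw [beq_iff_eq] at hui
      obtain ⟨e, he, hue⟩ := pv_U_fst_mem _ _ huU
      exact ⟨e, he, by rw [← hue, hui]⟩
    obtain ⟨e, he, het⟩ := hex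
    have heg : e ∈ pvGY points c := by rw [pvSorted, PySem.List.mem_sorted] at he; exact he
    obtain ⟨k, hkl, hkc, hke⟩ := (pv_mem_gY points c e).mp heg
    have hkt : k = t := by
      have h2 : ((k : Nat) : Int) = (t : Int) := by rw [hke] at het; exact het
      exact_mod_cast h2
    subst hkt
    have hvi : ((points[k].1 : Int), ((k : Nat) : Int)) ∈ pvSorted (pvGY points c) :=
      hke ▸ he
    obtain ⟨p, hps, hpne, hav⟩ :=
      pv_GA _ (pv_sorted_mono _) hnds points[k].1 ((k : Nat) : Int) hvi a hac
    have hpg : p ∈ pvGY points c := by rw [pvSorted, PySem.List.mem_sorted] at hps; exact hps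
    obtain ⟨j, hjl, hjc, hjp⟩ := (pv_mem_gY points c p).mp hpg
    refine ⟨|points[j].1 - points[k].1|, ?_, ?_⟩
    · rw [pvAllB]
      apply List.mem_flatMap.mpr
      refine ⟨((j : Int), points[j]),
        (PySem.List.mem_enumerate_iff points 0 _).mpr ⟨j, hjl, by simp⟩, ?_⟩
      simp only [pvFB]
      rw [if_neg (by intro hcon; apply hpne; rw [hjp]; exact hcon)]
      apply List.mem_append_right
      rw [if_pos (by rw [hjc, hkc])]
      simp
    · rw [hav, hjp]
      rw [show ((points[j].1 : Int), ((j : Nat) : Int)).1 = points[j].1 from rfl]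
      rw [abs_sub_comm]

theorem pv_dom2 (points : List (Int × Int)) (t : Nat) (ht : t < points.length) :
    ∀ b ∈ pvAllB points (t : Int) points[t].1 points[t].2,
      ∃ a ∈ pvVals (pvUX points ++ pvUY points) (t : Int), a ≤ b := by
  intro b hb
  obtain ⟨q, hq, hbq⟩ := List.mem_flatMap.mp hb
  obtain ⟨k, hkl, rfl⟩ := (PySem.List.mem_enumerate_iff points 0 q).mp hq
  simp only [pvFB, zero_add] at hbq
  by_cases hik : ((k : Nat) : Int) = (t : Int)
  · rw [if_pos hik] at hbq
    exact absurd hbq (List.not_mem_nil)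
  · rw [if_neg hik] at hbq
    rcases List.mem_append.mp hbq with hb1 | hb1
    · by_cases hcx : points[k].1 = points[t].1
      · rw [if_pos hcx] at hb1
        have hbv : b = |points[k].2 - points[t].2| := List.mem_singleton.mp hb1
        have hcmem : points[t].1 ∈ PySem.Set.ofList (points.map (fun p => p.1)) :=
          (PySem.Set.mem_ofList _ _).mpr (List.mem_map.mpr ⟨points[t], List.getElem_mem ht, rfl⟩)
        have hnds := pv_sorted_nodup _ (pv_gX_nodup points points[t].1)
        have hvi : ((points[t].2 : Int), (t : Int)) ∈ pvSorted (pvGX points points[t].1) := by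
          rw [pvSorted, PySem.List.mem_sorted]
          exact (pv_mem_gX _ _ _).mpr ⟨t, ht, rfl, rfl⟩
        have hpmem : ((points[k].2 : Int), ((k : Nat) : Int)) ∈ pvSorted (pvGX points points[t].1) := by
          rw [pvSorted, PySem.List.mem_sorted]
          exact (pv_mem_gX _ _ _).mpr ⟨k, hkl, hcx, rfl⟩
        obtain ⟨a, hav, hab⟩ := pv_GB _ (pv_sorted_mono _) hnds points[t].2 (t : Int) hvi
          ((points[k].2 : Int), ((k : Nat) : Int)) hpmem (by intro hcon; exact hik hcon)
        refine ⟨a, ?_, ?_⟩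
        · rw [pv_vals_append]
          apply List.mem_append_left
          rw [pvUX, pv_vals_flatMap]
          exact List.mem_flatMap.mpr ⟨points[t].1, hcmem, hav⟩
        · rw [hbv]
          calc a ≤ |points[t].2 - ((points[k].2 : Int), ((k : Nat) : Int)).1| := hab
            _ = |points[k].2 - points[t].2| := abs_sub_comm _ _
      · rw [if_neg hcx] at hb1
        exact absurd hb1 (List.not_mem_nil)
    · by_cases hcy : points[k].2 = points[t].2
      · rw [if_pos hcy] at hb1
        have hbv : b = |points[k].1 - points[t].1| := List.mem_singleton.mp hb1
        have hcmem : points[t].2 ∈ PySem.Set.ofList (points.map (fun p => p.2)) :=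
          (PySem.Set.mem_ofList _ _).mpr (List.mem_map.mpr ⟨points[t], List.getElem_mem ht, rfl⟩)
        have hnds := pv_sorted_nodup _ (pv_gY_nodup points points[t].2)
        have hvi : ((points[t].1 : Int), (t : Int)) ∈ pvSorted (pvGY points points[t].2) := by
          rw [pvSorted, PySem.List.mem_sorted]
          exact (pv_mem_gY _ _ _).mpr ⟨t, ht, rfl, rfl⟩
        have hpmem : ((points[k].1 : Int), ((k : Nat) : Int)) ∈ pvSorted (pvGY points points[t].2) := by
          rw [pvSorted, PySem.List.mem_sorted]
          exact (pv_mem_gY _ _ _).mpr ⟨k, hkl, hcy, rfl⟩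
        obtain ⟨a, hav, hab⟩ := pv_GB _ (pv_sorted_mono _) hnds points[t].1 (t : Int) hvi
          ((points[k].1 : Int), ((k : Nat) : Int)) hpmem (by intro hcon; exact hik hcon)
        refine ⟨a, ?_, ?_⟩
        · rw [pv_vals_append]
          apply List.mem_append_right
          rw [pvUY, pv_vals_flatMap]
          exact List.mem_flatMap.mpr ⟨points[t].2, hcmem, hav⟩
        · rw [hbv]
          calc a ≤ |points[t].1 - ((points[k].1 : Int), ((k : Nat) : Int)).1| := hab
            _ = |points[k].1 - points[t].1| := abs_sub_comm _ _
      · rw [if_neg hcy] at hb1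
        exact absurd hb1 (List.not_mem_nil)

-- B as a map of min-folds
theorem pv_alt_eq (points : List (Int × Int)) :
    solve_alt points = (PySem.List.enumerate points).map
      (fun p => (pvAllB points p.1 p.2.1 p.2.2).foldl min (100000000000000000000 : Int)) := by
  have hstep : ∀ p : Int × (Int × Int),
      (PySem.List.enumerate points).foldl (fun best q =>
        if q.1 = p.1 then best
        else
          let best := if q.2.1 = p.2.1 then min best |q.2.2 - p.2.2| else best
          if q.2.2 = p.2.2 then min best |q.2.1 - p.2.1| else best)
        (100000000000000000000 : Int)
      = (pvAllB points p.1 p.2.1 p.2.2).foldl min (100000000000000000000 : Int) := by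
    intro p
    rw [pvAllB, List.foldl_flatMap]
    apply PySem.List.foldl_congr_mem
    intro acc q _
    by_cases h1 : q.1 = p.1 <;> by_cases h2 : q.2.1 = p.2.1 <;> by_cases h3 : q.2.2 = p.2.2 <;>
      simp [pvFB, h1, h2, h3]
  have h0 : solve_alt points
      = [] ++ (PySem.List.enumerate points).map (fun p =>
        (PySem.List.enumerate points).foldl (fun best q =>
          if q.1 = p.1 then best
          else
            let best := if q.2.1 = p.2.1 then min best |q.2.2 - p.2.2| else best
            if q.2.2 = p.2.2 then min best |q.2.1 - p.2.1| else best)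
          (100000000000000000000 : Int)) :=
    PySem.List.foldl_append_singleton_eq_map _ _ []
  rw [h0, List.nil_append]
  exact List.map_congr_left (fun p _ => hstep p)

-- ===== VERDICT (by name: the statement is the Claim_ definition above) =====
theorem solve_spec : Claim_equal_solve := by
  unfold Claim_equal_solve
  intro points _
  unfold Spec_solve
  rw [pv_solve_eq, pv_alt_eq]
  apply List.ext_getElem
  · rw [pv_length_apply]
    simp [PySem.List.length_enumerate]
  intro t h1 h2
  have ht : t < points.length := by
    simpa [PySem.List.length_enumerate] using h2
  rw [List.getElem_map]
  have hre : (PySem.List.enumerate points)[t]'(by simpa [PySem.List.length_enumerate] using ht)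
      = ((t : Int), points[t]) := by
    rw [PySem.List.getElem_enumerate]
    simp
  rw [hre]
  have hlen : ((t : Nat) : Int) < (((pvApply
      (List.replicate points.length (100000000000000000000 : Int))
      (pvUX points ++ pvUY points)).length : Nat) : Int) := by
    rw [pv_length_apply]
    simp only [List.length_replicate]
    exact_mod_cast ht
  have hL : (pvApply (List.replicate points.length (100000000000000000000 : Int))
        (pvUX points ++ pvUY points))[t]'h1
      = PySem.List.pyGetD (pvApply (List.replicate points.length (100000000000000000000 : Int))
        (pvUX points ++ pvUY points)) ((t : Nat) : Int) 0 := by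
    rw [PySem.List.pyGetD_eq_getElem _ 0 (Int.natCast_nonneg t) hlen]
    simp
  rw [hL]
  rw [pv_apply_get _ _ t (by simp [ht]) (pv_U_fst_nonneg points)]
  have hrep : PySem.List.pyGetD (List.replicate points.length (100000000000000000000 : Int))
      ((t : Nat) : Int) 0 = (100000000000000000000 : Int) := by
    rw [PySem.List.pyGetD_eq_getElem _ 0 (Int.natCast_nonneg t)
      (by simp only [List.length_replicate]; exact_mod_cast ht)]
    simp
  rw [hrep]
  exact pv_mfold_eq _ _ _ (pv_dom1 points t ht) (pv_dom2 points t ht)
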